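-- pv_equiv track=rewrite | github.com/konstntokas/xcube | xcube/webapi/ows/coverages/controllers.py | _find_geographic_parameters
-- ===== SOURCE A (Python) =====
-- from typing import Mapping, Sequence, Optional, Any, Literal, NamedTuple, Union
--
-- def _find_geographic_parameters(
--     names: list[str],
-- ) -> tuple[Optional[str], Optional[str]]:
--     x, y = None, None
--     for name in names:
--         if name.lower()[:3] in ['x', 'e', 'eas', 'lon']:
--             x = name
--         if name.lower()[:3] in ['y', 'n', 'nor', 'lat']:
--             y = name
--     return x, y
-- ===== SOURCE B (Python) =====
-- from typing import Optional
--
-- def _find_geographic_parameters(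
--     names: list[str],
-- ) -> tuple[Optional[str], Optional[str]]:
--     # Backward scan with early exit: the last match in `names` is the first
--     # match seen from the end; stop as soon as both axes are found.
--     x: Optional[str] = None
--     y: Optional[str] = None
--     for name in reversed(names):
--         key = name.lower()[:3]
--         if x is None and key in ('x', 'e', 'eas', 'lon'):
--             x = name
--         if y is None and key in ('y', 'n', 'nor', 'lat'):
--             y = name
--         if x is not None and y is not None:
--             break
--     return x, y
-- ===== Notes on version B (the rewrite author's own statement) =====
-- stated objective: alternative
-- what changed: Replaces A's accumulating forward pass (last match overwrites) with a backward scan that records only the first match from the end for each axis and breaks early once both are found, computing the lowered 3-char key once per name.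
import Mathlib
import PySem

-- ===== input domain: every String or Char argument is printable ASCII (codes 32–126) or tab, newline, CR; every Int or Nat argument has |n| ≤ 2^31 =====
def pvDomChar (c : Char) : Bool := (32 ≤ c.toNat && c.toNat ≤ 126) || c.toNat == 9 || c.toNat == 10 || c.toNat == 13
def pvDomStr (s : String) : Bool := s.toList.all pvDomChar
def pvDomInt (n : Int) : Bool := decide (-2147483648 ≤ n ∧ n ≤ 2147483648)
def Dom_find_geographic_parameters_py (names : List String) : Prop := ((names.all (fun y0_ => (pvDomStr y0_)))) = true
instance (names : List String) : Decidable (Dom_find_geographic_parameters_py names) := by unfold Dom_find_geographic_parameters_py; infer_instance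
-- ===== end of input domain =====

-- B replaces A's single accumulating forward pass with a backward scan
-- holding the first match from the end per axis, with early exit; same cost.

-- ===== PORT A =====
-- A-side helpers: name.lower()[:3] and the two list-membership tests
def pvKey3 (name : String) : String :=
  PySem.Str.slice (PySem.Str.lower name) none (some 3)

def pvIsX (name : String) : Bool := ["x", "e", "eas", "lon"].contains (pvKey3 name)
def pvIsY (name : String) : Bool := ["y", "n", "nor", "lat"].contains (pvKey3 name)

def find_geographic_parameters_py (names : List String) : Option String × Option String :=
  names.foldl
    (fun xy name =>
      let xy := if pvIsX name then (some name, xy.2) else xy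
      if pvIsY name then (xy.1, some name) else xy)
    (none, none)

-- ===== PORT B =====
-- the loop body of Source B: key computed once, fill an axis only if still empty,
-- break when both are filled
def pvAltGo : List String → Option String → Option String → Option String × Option String
  | [], x, y => (x, y)
  | name :: rest, x, y =>
    let key := PySem.Str.slice (PySem.Str.lower name) none (some 3)
    let x := if x.isNone && (key == "x" || key == "e" || key == "eas" || key == "lon")
             then some name else x
    let y := if y.isNone && (key == "y" || key == "n" || key == "nor" || key == "lat")
             then some name else y
    if x.isSome && y.isSome then (x, y) else pvAltGo rest x y

def find_geographic_parameters_py_alt (names : List String) : Option String × Option String :=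
  pvAltGo names.reverse none none

-- ===== PRECONDITION & SPEC =====
def Spec_find_geographic_parameters_py (names : List String) (out : Option String × Option String) : Prop := out = find_geographic_parameters_py_alt names
instance (names : List String) (out : Option String × Option String) : Decidable (Spec_find_geographic_parameters_py names out) := by unfold Spec_find_geographic_parameters_py; infer_instance

-- ===== CLAIM (what is proved, stated in full; the proofs are below) =====
def Claim_equal_find_geographic_parameters_py : Prop := ∀ (names : List String), Dom_find_geographic_parameters_py names → Spec_find_geographic_parameters_py names (find_geographic_parameters_py names)

-- ===== LEMMAS AND PROOFS =====

-- B's membership tests equal A's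
theorem pvAltX (name : String) :
    ((PySem.Str.slice (PySem.Str.lower name) none (some 3)) == "x"
      || (PySem.Str.slice (PySem.Str.lower name) none (some 3)) == "e"
      || (PySem.Str.slice (PySem.Str.lower name) none (some 3)) == "eas"
      || (PySem.Str.slice (PySem.Str.lower name) none (some 3)) == "lon") = pvIsX name := by
  simp only [pvIsX, pvKey3, List.contains_cons, List.contains_nil, Bool.or_false, Bool.or_assoc]

theorem pvAltY (name : String) :
    ((PySem.Str.slice (PySem.Str.lower name) none (some 3)) == "y"
      || (PySem.Str.slice (PySem.Str.lower name) none (some 3)) == "n"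
      || (PySem.Str.slice (PySem.Str.lower name) none (some 3)) == "nor"
      || (PySem.Str.slice (PySem.Str.lower name) none (some 3)) == "lat") = pvIsY name := by
  simp only [pvIsY, pvKey3, List.contains_cons, List.contains_nil, Bool.or_false, Bool.or_assoc]

-- B's early-exit backward scan computes, per axis, the initial value if set,
-- else the first match in the remaining list.
theorem pvAltGo_char (l : List String) (x y : Option String) :
    pvAltGo l x y = (x.or (l.find? pvIsX), y.or (l.find? pvIsY)) := by
  induction l generalizing x y with
  | nil => simp [pvAltGo]
  | cons a l ih =>
    simp only [pvAltGo, pvAltX, pvAltY, List.find?]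
    cases x <;> cases y <;> by_cases hx : pvIsX a <;> by_cases hy : pvIsY a <;>
      simp [hx, hy, ih]

-- A's fold from any initial state keeps the LAST match of each predicate,
-- i.e. the first match of the reversed list, falling back to the initial state.
theorem pvFold_char (names : List String) (x0 y0 : Option String) :
    names.foldl
      (fun xy name =>
        let xy := if pvIsX name then (some name, xy.2) else xy
        if pvIsY name then (xy.1, some name) else xy)
      (x0, y0)
    = ((names.reverse.find? pvIsX).or x0, (names.reverse.find? pvIsY).or y0) := by
  induction names generalizing x0 y0 with
  | nil => simp
  | cons a l ih =>
    simp only [List.foldl_cons, List.reverse_cons, List.find?_append]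
    by_cases hx : pvIsX a <;> by_cases hy : pvIsY a <;>
      simp [hx, hy, ih]

-- ===== VERDICT (by name: the statement is the Claim_ definition above) =====
theorem find_geographic_parameters_py_spec : Claim_equal_find_geographic_parameters_py := by
  intro names _
  show find_geographic_parameters_py names = find_geographic_parameters_py_alt names
  simp [find_geographic_parameters_py, find_geographic_parameters_py_alt,
    pvFold_char, pvAltGo_char]
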